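-- pv_equiv track=rewrite | github.com/gzh23/python_operator | delta.py | delta_operator
-- ===== SOURCE A (Python) =====
-- def delta_operator(sequence):
--     transformed_sequence = []
--
--     # 分段为8个8个的
--     segmented_sequence = [sequence[i:i+8] for i in range(0, len(sequence), 8)]
--
--     for segment in segmented_sequence:
--         transformed_segment = [segment[0]]  # 第一个数不变
--         for i in range(1, len(segment)):
--             # 其与数字变为与前一个数字的差值
--             difference = segment[i] - segment[i-1]
--             transformed_segment.append(difference)
--
--         transformed_sequence.extend(transformed_segment)
--
--     return transformed_sequence
-- ===== SOURCE B (Python) =====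
-- def delta_operator(sequence):
--     out = []
--     for i in range(len(sequence)):
--         if i % 8 == 0:
--             out.append(sequence[i])
--         else:
--             out.append(sequence[i] - sequence[i - 1])
--     return out
-- ===== Notes on version B (the rewrite author's own statement) =====
-- stated objective: simpler
-- what changed: Replaced the slice-into-8-blocks step and the nested per-segment loop with a single flat index loop that emits sequence[i] when i % 8 == 0 and sequence[i] - sequence[i-1] otherwise; no intermediate list-of-segments is built.
import Mathlib
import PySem

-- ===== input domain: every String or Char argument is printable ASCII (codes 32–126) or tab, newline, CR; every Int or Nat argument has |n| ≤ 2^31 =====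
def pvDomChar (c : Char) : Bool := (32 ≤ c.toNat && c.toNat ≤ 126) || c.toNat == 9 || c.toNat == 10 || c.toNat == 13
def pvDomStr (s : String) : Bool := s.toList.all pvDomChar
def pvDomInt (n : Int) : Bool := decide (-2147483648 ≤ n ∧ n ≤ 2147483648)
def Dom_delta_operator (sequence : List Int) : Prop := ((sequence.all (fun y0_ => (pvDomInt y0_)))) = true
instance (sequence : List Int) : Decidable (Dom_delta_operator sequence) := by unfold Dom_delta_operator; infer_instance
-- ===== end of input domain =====

-- B drops A's intermediate list of 8-element segments and its nested loop: one flat index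
-- loop emits sequence[i] when i % 8 == 0 and sequence[i] - sequence[i-1] otherwise (simpler).

-- ===== PORT A =====
-- segment[0] and segment[i] are ported with pyGetD (default 0): every segment produced by the
-- slicing comprehension is nonempty and every index is in range, so the default is never used.
def delta_operator (sequence : List Int) : List Int :=
  let segmented_sequence : List (List Int) :=
    (PySem.List.pyRange 0 (sequence.length : Int) 8).map
      (fun i => PySem.List.slice sequence (some i) (some (i + 8)))
  segmented_sequence.foldl
    (fun transformed_sequence segment =>
      let transformed_segment : List Int :=
        (PySem.List.pyRange 1 (segment.length : Int) 1).foldl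
          (fun ts i =>
            let difference := PySem.List.pyGetD segment i 0 - PySem.List.pyGetD segment (i - 1) 0
            ts ++ [difference])
          [PySem.List.pyGetD segment 0 0]
      transformed_sequence ++ transformed_segment)
    []

-- ===== PORT B =====
def delta_operator_alt (sequence : List Int) : List Int :=
  (PySem.List.pyRange 0 (sequence.length : Int) 1).foldl
    (fun out i =>
      if PySem.Int.mod i 8 = 0 then
        out ++ [PySem.List.pyGetD sequence i 0]
      else
        out ++ [PySem.List.pyGetD sequence i 0 - PySem.List.pyGetD sequence (i - 1) 0])
    []

-- ===== PRECONDITION & SPEC =====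
def Spec_delta_operator (sequence : List Int) (out : List Int) : Prop := out = delta_operator_alt sequence
instance (sequence : List Int) (out : List Int) : Decidable (Spec_delta_operator sequence out) := by unfold Spec_delta_operator; infer_instance

-- ===== CLAIM (what is proved, stated in full; the proofs are below) =====
def Claim_equal_delta_operator : Prop := ∀ (sequence : List Int), Dom_delta_operator sequence → Spec_delta_operator sequence (delta_operator sequence)

-- ===== LEMMAS AND PROOFS =====

-- the transform of one segment (Nat-indexed closed form)
def pvBlockT (b : List Int) : List Int :=
  b.getD 0 0 :: (List.range (b.length - 1)).map (fun j => b.getD (j + 1) 0 - b.getD j 0)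

-- B's per-index value (Nat-indexed closed form)
def pvF (s : List Int) (i : Nat) : Int :=
  if i % 8 = 0 then s.getD i 0 else s.getD i 0 - s.getD (i - 1) 0

-- A's closed form: chunks of 8, each transformed by pvBlockT
def pvA (s : List Int) : List Int :=
  ((List.range ((s.length + 7) / 8)).map (fun k => (s.drop (8 * k)).take 8)).flatMap pvBlockT

-- foldl with an if whose two branches each append one element
theorem pv_foldl_append_ite {α β : Type} (p : α → Prop) [DecidablePred p] (f g : α → β)
    (l : List α) (acc : List β) :
    l.foldl (fun acc x => if p x then acc ++ [f x] else acc ++ [g x]) acc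
      = acc ++ l.map (fun x => if p x then f x else g x) := by
  induction l generalizing acc with
  | nil => simp
  | cons x xs ih => simp [ih]; split_ifs <;> simp

theorem pv_getD_drop (s : List Int) (i j : Nat) :
    (s.drop i).getD j 0 = s.getD (i + j) 0 := by
  simp [List.getD, List.getElem?_drop]

theorem pv_getD_take (s : List Int) (m j : Nat) (h : j < m) :
    (s.take m).getD j 0 = s.getD j 0 := by
  simp [List.getD, h]

-- B's port is the Nat-indexed map
theorem pv_alt_eq (s : List Int) :
    delta_operator_alt s = (List.range s.length).map (pvF s) := by
  unfold delta_operator_alt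
  rw [pv_foldl_append_ite]
  rw [PySem.List.pyRange_one]
  simp only [sub_zero, Int.toNat_natCast, List.map_map, List.nil_append]
  apply List.map_congr_left
  intro k hk
  simp only [List.mem_range] at hk
  simp only [Function.comp, zero_add, pvF]
  have hmod : PySem.Int.mod (k : Int) 8 = ((k % 8 : Nat) : Int) := by
    rw [PySem.Int.mod_eq_emod_of_pos (by norm_num)]
    exact_mod_cast (Int.natCast_mod k 8).symm
  rw [hmod]
  by_cases h8 : k % 8 = 0
  · rw [if_pos (by exact_mod_cast h8 : ((k % 8 : Nat) : Int) = 0), if_pos h8,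
      PySem.List.pyGetD_natCast]
  · have hcast : (k : Int) - 1 = ((k - 1 : Nat) : Int) := by omega
    rw [if_neg (by exact_mod_cast h8 : ¬ ((k % 8 : Nat) : Int) = 0), if_neg h8, hcast,
      PySem.List.pyGetD_natCast, PySem.List.pyGetD_natCast]

-- pvBlockT of one segment, from the inner pyRange loop
theorem pv_inner_eq (seg : List Int) :
    (PySem.List.pyRange 1 (seg.length : Int) 1).foldl
        (fun ts i => ts ++ [PySem.List.pyGetD seg i 0 - PySem.List.pyGetD seg (i - 1) 0])
        [PySem.List.pyGetD seg 0 0]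
      = pvBlockT seg := by
  rw [PySem.List.foldl_append_singleton_eq_map, PySem.List.pyRange_one]
  unfold pvBlockT
  have hlen : ((seg.length : Int) - 1).toNat = seg.length - 1 := by omega
  rw [hlen]
  simp only [List.map_map, List.singleton_append]
  congr 1
  · cases seg <;> simp [PySem.List.pyGetD, PySem.List.pyGet?, PySem.List.pyIdx?, List.getD]
  · apply List.map_congr_left
    intro j hj
    simp only [Function.comp]
    have h2 : (1 : Int) + (j : Nat) - 1 = ((j : Nat) : Int) := by omega
    have h1 : (1 : Int) + (j : Nat) = ((j + 1 : Nat) : Int) := by push_cast; ring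
    rw [h2, h1, PySem.List.pyGetD_natCast, PySem.List.pyGetD_natCast]

-- A's port is pvA
theorem pv_a_eq (s : List Int) : delta_operator s = pvA s := by
  unfold delta_operator pvA
  rw [PySem.List.foldl_append_eq_flatMap]
  simp only [List.nil_append, pv_inner_eq]
  congr 1
  rw [PySem.List.pyRange_of_pos 0 (s.length : Int) (by norm_num)]
  simp only [List.map_map, sub_zero]
  have hm : (if (0 : Int) < (s.length : Int) then (((s.length : Int) + 8 - 1) / 8).toNat else 0)
        = (s.length + 7) / 8 := by
      split_ifs with h
      · have h9 : ((s.length : Int) + 8 - 1) = ((s.length + 7 : Nat) : Int) := by push_cast; ring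
        have h10 : ((s.length + 7 : Nat) : Int) / 8 = (((s.length + 7) / 8 : Nat) : Int) := by
          exact_mod_cast (Int.natCast_div (s.length + 7) 8).symm
        rw [h9, h10]
        exact Int.toNat_natCast _
      · have : s.length = 0 := by omega
        simp [this]
  rw [hm]
  apply List.map_congr_left
  intro k _
  simp only [Function.comp, zero_add]
  have h2 : (8 : Int) * (k : Nat) + 8 = ((8 * k : Nat) : Int) + ((8 : Nat) : Int) := by push_cast; ring
  have h1 : (8 : Int) * (k : Nat) = ((8 * k : Nat) : Int) := by push_cast; ring
  rw [h2, h1, PySem.List.slice_natCast_add]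

-- chunk-step for B's closed form
theorem pv_map_chunk (s : List Int) (h : s ≠ []) :
    (List.range s.length).map (pvF s)
      = pvBlockT (s.take 8) ++ (List.range (s.drop 8).length).map (pvF (s.drop 8)) := by
  have hn : 0 < s.length := List.length_pos_iff.mpr h
  have hsplit : List.range s.length
      = List.range (min 8 s.length) ++ (List.range (s.length - 8)).map (fun x => min 8 s.length + x) := by
    conv_lhs => rw [show s.length = min 8 s.length + (s.length - 8) by omega]
    exact List.range_add
  rw [hsplit, List.map_append, List.map_map]
  congr 1
  · -- first block
    unfold pvBlockT
    rw [show min 8 s.length = (min 8 s.length - 1) + 1 by omega, List.range_succ_eq_map]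
    simp only [List.map_cons, List.map_map]
    congr 1
    · rw [pv_getD_take s 8 0 (by omega)]
      simp [pvF]
    · rw [List.length_take]
      apply List.map_congr_left
      intro j hj
      simp only [List.mem_range] at hj
      simp only [Function.comp, Nat.succ_eq_add_one]
      have hj8 : j + 1 < 8 := by omega
      rw [pv_getD_take s 8 (j + 1) hj8, pv_getD_take s 8 j (by omega)]
      have : ¬ (j + 1) % 8 = 0 := by omega
      simp [pvF, this]
  · rw [List.length_drop]
    apply List.map_congr_left
    intro x hx
    simp only [List.mem_range] at hx
    have h8 : min 8 s.length = 8 := by omega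
    simp only [Function.comp, h8]
    unfold pvF
    have hmod : (8 + x) % 8 = x % 8 := Nat.add_mod_left 8 x
    by_cases hx8 : x % 8 = 0
    · rw [if_pos (by omega), if_pos hx8, pv_getD_drop]
    · have hx1 : 1 ≤ x := by omega
      rw [if_neg (by omega), if_neg hx8, pv_getD_drop,
        show 8 + x - 1 = 8 + (x - 1) by omega, pv_getD_drop]

-- chunk-step for A's closed form
theorem pv_pvA_chunk (s : List Int) (h : s ≠ []) :
    pvA s = pvBlockT (s.take 8) ++ pvA (s.drop 8) := by
  have hn : 0 < s.length := List.length_pos_iff.mpr h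
  unfold pvA
  rw [show (s.length + 7) / 8 = ((s.length + 7) / 8 - 1) + 1 by omega, List.range_succ_eq_map]
  simp only [List.map_cons, List.flatMap_cons, List.map_map, Nat.mul_zero, List.drop_zero]
  congr 1
  rw [List.length_drop, show (s.length - 8 + 7) / 8 = (s.length + 7) / 8 - 1 by omega]
  congr 1
  apply List.map_congr_left
  intro k _
  simp only [Function.comp, Nat.succ_eq_add_one, List.drop_drop]
  congr 2
  omega

theorem pv_main (n : Nat) : ∀ (s : List Int), s.length ≤ n → pvA s = (List.range s.length).map (pvF s) := by
  induction n with
  | zero =>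
    intro s hs
    have : s = [] := by cases s <;> simp_all
    simp [this, pvA]
  | succ n ih =>
    intro s hs
    by_cases hnil : s = []
    · simp [hnil, pvA]
    · rw [pv_pvA_chunk s hnil, pv_map_chunk s hnil, ih (s.drop 8) (by
        have : 1 ≤ s.length := by cases s <;> simp_all
        simp only [List.length_drop]; omega)]

-- ===== VERDICT (by name: the statement is the Claim_ definition above) =====
theorem delta_operator_spec : Claim_equal_delta_operator := by
  intro s _
  unfold Spec_delta_operator
  rw [pv_alt_eq, pv_a_eq, pv_main s.length s (le_refl _)]
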